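-- pv_equiv track=rewrite | github.com/i-am-not-kangjik/algorithm | 프로그래머스/0/120864. 숨어있는 숫자의 덧셈 （2）/숨어있는 숫자의 덧셈 （2）.py | solution
-- ===== SOURCE A (Python) =====
-- def solution(my_string):
--     answer = 0
--     tmp = ''
--
--     for i in range(len(my_string)):
--         if i < len(my_string) - 1:
--             if my_string[i].isnumeric():
--                 if my_string[i+1].isnumeric():
--                     tmp += my_string[i]
--                 else:
--                     if tmp:
--                         tmp += my_string[i]
--                         answer += int(tmp)
--                         tmp = ''
--                     else:
--                         answer += int(my_string[i])
--         if i == len(my_string) - 1: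
--             if my_string[i].isnumeric():
--                 if tmp:
--                         tmp += my_string[i]
--                         answer += int(tmp)
--                         tmp = ''
--                 else:
--                     answer += int(my_string[i])
--     return answer
-- ===== SOURCE B (Python) =====
-- def solution(my_string):
--     # Collect the maximal numeric runs in one sweep, then sum int() over them.
--     runs = []
--     cur = ''
--     for ch in my_string:
--         if ch.isnumeric():
--             cur += ch
--         else:
--             if cur:
--                 runs.append(cur)
--                 cur = ''
--     if cur:
--         runs.append(cur)
--     return sum(int(r) for r in runs)
-- ===== Notes on version B (the rewrite author's own statement) =====
-- stated objective: simpler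
-- what changed: Replaces A's index loop with lookahead at my_string[i+1] and a duplicated last-index flush branch by a single index-free pass that collects the maximal numeric runs into a list, followed by sum(int(r) for r in runs).
import Mathlib
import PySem

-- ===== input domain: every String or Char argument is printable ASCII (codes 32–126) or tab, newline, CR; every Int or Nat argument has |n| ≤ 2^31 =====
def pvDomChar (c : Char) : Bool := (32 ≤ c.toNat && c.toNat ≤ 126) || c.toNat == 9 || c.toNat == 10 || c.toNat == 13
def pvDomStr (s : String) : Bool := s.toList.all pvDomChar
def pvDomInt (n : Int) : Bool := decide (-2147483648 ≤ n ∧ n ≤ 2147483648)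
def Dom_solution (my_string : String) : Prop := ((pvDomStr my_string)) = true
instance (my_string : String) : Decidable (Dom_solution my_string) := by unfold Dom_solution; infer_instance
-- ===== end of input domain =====

-- B replaces A's index loop with lookahead and a duplicated last-index flush branch by one
-- index-free pass collecting the maximal numeric runs, then summing int() over them (simpler).

-- str.isnumeric on one char; exact on the ASCII domain, where isnumeric coincides with '0'..'9'
def pyIsNumeric (c : Char) : Bool := PySem.Chars.isdigit c

-- int(r); both programs only apply it to nonempty digit runs, where ofChars? is `some`
def intOf (r : List Char) : Int := (PySem.Int.ofChars? r).getD 0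

-- ===== PORT A =====
def solutionStep (cs : List Char) (st : Int × List Char) (i : Int) : Int × List Char :=
  let st1 :=
    if i < (cs.length : Int) - 1 then
      let c := PySem.List.pyGetD cs i ' '   -- my_string[i]; i ∈ range(len), always in range
      if pyIsNumeric c then
        if pyIsNumeric (PySem.List.pyGetD cs (i + 1) ' ') then
          (st.1, st.2 ++ [c])
        else
          if st.2 ≠ [] then (st.1 + intOf (st.2 ++ [c]), ([] : List Char))
          else (st.1 + intOf [c], st.2)
      else st
    else st
  if i = (cs.length : Int) - 1 then
    let c := PySem.List.pyGetD cs i ' '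
    if pyIsNumeric c then
      if st1.2 ≠ [] then (st1.1 + intOf (st1.2 ++ [c]), ([] : List Char))
      else (st1.1 + intOf [c], st1.2)
    else st1
  else st1

def solution (my_string : String) : Int :=
  let cs := my_string.toList
  ((PySem.List.pyRange 0 (cs.length : Int)).foldl (solutionStep cs) (0, [])).1

-- ===== PORT B =====
def solutionAltStep (st : List (List Char) × List Char) (ch : Char) : List (List Char) × List Char :=
  if pyIsNumeric ch then (st.1, st.2 ++ [ch])
  else if st.2 ≠ [] then (st.1 ++ [st.2], ([] : List Char)) else st

def solution_alt (my_string : String) : Int :=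
  let st := my_string.toList.foldl solutionAltStep ([], [])
  let runs := if st.2 ≠ [] then st.1 ++ [st.2] else st.1
  (runs.map intOf).sum

-- ===== PRECONDITION & SPEC =====
def Spec_solution (my_string : String) (out : Int) : Prop := out = solution_alt my_string
instance (my_string : String) (out : Int) : Decidable (Spec_solution my_string out) := by unfold Spec_solution; infer_instance

-- ===== CLAIM (what is proved, stated in full; the proofs are below) =====
def Claim_equal_solution : Prop := ∀ (my_string : String), Dom_solution my_string → Spec_solution my_string (solution my_string)

-- ===== LEMMAS AND PROOFS =====

-- the maximal numeric runs of l, given the pending (possibly empty) run `cur`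
def runsFrom : List Char → List Char → List (List Char)
  | [], cur => if cur ≠ [] then [cur] else []
  | c :: rest, cur =>
      if pyIsNumeric c then runsFrom rest (cur ++ [c])
      else if cur ≠ [] then cur :: runsFrom rest [] else runsFrom rest []

lemma alt_bridge : ∀ (l : List Char) (runs : List (List Char)) (cur : List Char),
    (if (l.foldl solutionAltStep (runs, cur)).2 ≠ [] then
        (l.foldl solutionAltStep (runs, cur)).1 ++ [(l.foldl solutionAltStep (runs, cur)).2]
      else (l.foldl solutionAltStep (runs, cur)).1)
      = runs ++ runsFrom l cur := by
  intro l
  induction l with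
  | nil =>
    intro runs cur
    simp only [List.foldl, runsFrom]
    split_ifs <;> simp_all
  | cons c rest ih =>
    intro runs cur
    by_cases hc : pyIsNumeric c
    · have hstep : solutionAltStep (runs, cur) c = (runs, cur ++ [c]) := by
        simp [solutionAltStep, hc]
      rw [List.foldl_cons, hstep, ih]
      simp [runsFrom, hc]
    · by_cases hcur : cur = []
      · have hstep : solutionAltStep (runs, cur) c = (runs, cur) := by
          simp [solutionAltStep, hc, hcur]
        rw [List.foldl_cons, hstep, ih]
        simp [runsFrom, hc, hcur]
      · have hstep : solutionAltStep (runs, cur) c = (runs ++ [cur], ([] : List Char)) := by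
          simp [solutionAltStep, hc, hcur]
        rw [List.foldl_cons, hstep, ih]
        simp [runsFrom, hc, hcur, List.append_assoc]

lemma a_bridge (cs : List Char) : ∀ (l : List Char) (k : Nat) (ans : Int) (tmp : List Char),
    cs.drop k = l → k + l.length = cs.length →
    (tmp ≠ [] → ∃ c rest, l = c :: rest ∧ pyIsNumeric c) →
    ((PySem.List.pyRange ((k : Nat) : Int) (cs.length : Int)).foldl (solutionStep cs) (ans, tmp)).1
      = ans + ((runsFrom l tmp).map intOf).sum := by
  intro l
  induction l with
  | nil =>
    intro k ans tmp hdrop hlen hinv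
    have hk : k = cs.length := by simpa using hlen
    have hnil : PySem.List.pyRange ((k : Nat) : Int) (cs.length : Int) = [] :=
      PySem.List.pyRange_one_eq_nil (by exact_mod_cast hk.ge)
    have htmp : tmp = [] := by
      by_contra h
      obtain ⟨c', r', he, _⟩ := hinv h
      simp at he
    rw [hnil]
    simp [runsFrom, htmp]
  | cons c rest ih =>
    intro k ans tmp hdrop hlen hinv
    have hkl : k < cs.length := by
      simp only [List.length_cons] at hlen; omega
    have hcons := PySem.List.pyRange_one_cons
      (a := ((k : Nat) : Int)) (b := (cs.length : Int)) (by exact_mod_cast hkl)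
    have hget : cs[k]? = some c := by rw [← List.head?_drop, hdrop]; rfl
    have hck : PySem.List.pyGetD cs ((k : Nat) : Int) ' ' = c := by
      rw [PySem.List.pyGetD_natCast, List.getD_eq_getElem?_getD, hget]; rfl
    have hdrop1 : cs.drop (k + 1) = rest := by
      rw [← List.tail_drop, hdrop]; rfl
    have hcast : ((k : Nat) : Int) + 1 = (((k + 1 : Nat) : Nat) : Int) := by push_cast; ring
    rw [hcons, List.foldl_cons]
    rcases rest with _ | ⟨d, rest'⟩
    · -- c is the last character
      have hlen1 : k + 1 = cs.length := by simpa using hlen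
      have hnil : PySem.List.pyRange (((k : Nat) : Int) + 1) (cs.length : Int) = [] :=
        PySem.List.pyRange_one_eq_nil (by omega)
      rw [hnil, List.foldl_nil]
      have hc1 : ¬(((k : Nat) : Int) < (cs.length : Int) - 1) := by omega
      have hc2 : (((k : Nat) : Int) = (cs.length : Int) - 1) := by omega
      simp only [solutionStep, if_neg hc1, if_pos hc2, hck]
      by_cases hc : pyIsNumeric c
      · by_cases htmp : tmp = []
        · subst htmp; simp [hc, runsFrom]
        · simp [hc, htmp, runsFrom]
      · have htmp : tmp = [] := by
          by_contra h
          obtain ⟨c', r', he, hnum⟩ := hinv h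
          cases he
          exact hc hnum
        subst htmp
        simp [hc, runsFrom]
    · -- there is a next character d
      have hlen2 : k + (rest'.length + 2) = cs.length := by
        simp only [List.length_cons] at hlen; omega
      have hgetd : cs[k+1]? = some d := by rw [← List.head?_drop, hdrop1]; rfl
      have hdk : PySem.List.pyGetD cs (((k : Nat) : Int) + 1) ' ' = d := by
        rw [hcast, PySem.List.pyGetD_natCast, List.getD_eq_getElem?_getD, hgetd]; rfl
      have hc1 : (((k : Nat) : Int) < (cs.length : Int) - 1) := by omega
      have hc2 : ¬(((k : Nat) : Int) = (cs.length : Int) - 1) := by omega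
      simp only [solutionStep, if_pos hc1, if_neg hc2, hck, hdk]
      rw [hcast]
      by_cases hc : pyIsNumeric c
      · by_cases hd : pyIsNumeric d
        · simp only [hc, hd, if_true]
          rw [ih (k + 1) ans (tmp ++ [c]) hdrop1
            (by simp only [List.length_cons]; omega)
            (by intro _; exact ⟨d, rest', rfl, hd⟩)]
          simp [runsFrom, hc, hd]
        · by_cases htmp : tmp = []
          · subst htmp
            simp only [hc, hd, if_true, Bool.false_eq_true, if_false, ne_eq,
              not_true_eq_false, List.nil_append]
            rw [ih (k + 1) (ans + intOf [c]) [] hdrop1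
              (by simp only [List.length_cons]; omega)
              (by intro h; exact absurd rfl h)]
            simp [runsFrom, hc, hd]
            ring
          · simp only [hc, hd, if_true, Bool.false_eq_true, if_false, ne_eq, htmp,
              not_false_eq_true]
            rw [ih (k + 1) (ans + intOf (tmp ++ [c])) [] hdrop1
              (by simp only [List.length_cons]; omega)
              (by intro h; exact absurd rfl h)]
            simp [runsFrom, hc, hd, htmp]
            ring
      · have htmp : tmp = [] := by
          by_contra h
          obtain ⟨c', r', he, hnum⟩ := hinv h
          cases he
          exact hc hnum
        subst htmp
        simp only [hc, Bool.false_eq_true, if_false]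
        rw [ih (k + 1) ans [] hdrop1
          (by simp only [List.length_cons]; omega)
          (by intro h; exact absurd rfl h)]
        simp [runsFrom, hc]

lemma solution_alt_eq (s : String) :
    solution_alt s = ((runsFrom s.toList []).map intOf).sum := by
  have h := alt_bridge s.toList [] []
  simp only [solution_alt]
  rw [h]
  simp

-- ===== VERDICT (by name: the statement is the Claim_ definition above) =====
theorem solution_spec : Claim_equal_solution := by
  intro s _
  unfold Spec_solution
  have hA := a_bridge s.toList s.toList 0 0 [] (by simp) (by simp) (by simp)
  rw [solution_alt_eq]
  simpa [solution] using hA
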